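-- pv_equiv track=rewrite | github.com/bilalakil/challenges | codechef/ltime45/coomilk.py | calc
-- ===== SOURCE A (Python) =====
-- def calc(foodstuffs):
--     '''
--     Returns a boolean.
--     '''
--
--     just_was_cookie = False
--
--     for foodstuff in foodstuffs:
--         if foodstuff == 'cookie':
--             if just_was_cookie:
--                 return False
--
--             just_was_cookie = True
--         else:
--             just_was_cookie = False
--
--     return not just_was_cookie
-- ===== SOURCE B (Python) =====
-- def calc(foodstuffs):
--     '''
--     Returns a boolean.
--     '''
--     cookie_at = {i for i, f in enumerate(foodstuffs) if f == 'cookie'}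
--     if any(i + 1 in cookie_at for i in cookie_at):
--         return False
--     return len(foodstuffs) - 1 not in cookie_at
-- ===== Notes on version B (the rewrite author's own statement) =====
-- stated objective: alternative
-- what changed: Replaces A's streaming just_was_cookie state machine with a set of cookie positions built once, then validity is two membership queries: no index i with both i and i+1 in the set, and len-1 not in the set.
import Mathlib
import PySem

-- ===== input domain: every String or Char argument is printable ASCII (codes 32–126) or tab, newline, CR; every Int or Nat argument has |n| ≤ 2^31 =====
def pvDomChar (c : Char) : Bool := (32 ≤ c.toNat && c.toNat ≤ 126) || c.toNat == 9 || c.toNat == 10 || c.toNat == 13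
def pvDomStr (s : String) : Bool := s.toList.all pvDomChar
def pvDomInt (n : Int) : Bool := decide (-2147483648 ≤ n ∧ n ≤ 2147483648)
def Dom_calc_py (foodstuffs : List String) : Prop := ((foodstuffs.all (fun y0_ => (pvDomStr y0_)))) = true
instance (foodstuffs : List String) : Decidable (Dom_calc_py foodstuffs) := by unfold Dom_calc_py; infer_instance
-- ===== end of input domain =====

-- B replaces A's streaming boolean state machine by a set of cookie positions queried
-- by membership (i and i+1 both cookies; last index a cookie); same values (alternative).

-- ===== PORT A =====
-- A's loop with early return: recursion over the list carrying just_was_cookie.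
def calcLoopA (jw : Bool) : List String → Bool
  | [] => !jw
  | f :: rest =>
    if f == "cookie" then
      if jw then false else calcLoopA true rest
    else calcLoopA false rest

def calc_py (foodstuffs : List String) : Bool := calcLoopA false foodstuffs

-- ===== PORT B =====
-- Source B: cookie_at = {i for i, f in enumerate(foodstuffs) if f == 'cookie'};
-- reject if some i and i+1 are both in the set, or len-1 is in the set.
def cookieAtB (foodstuffs : List String) : PySem.Set Int :=
  PySem.Set.ofList
    ((PySem.List.enumerate foodstuffs).filterMap
      (fun p => if p.2 == "cookie" then some p.1 else none))

def calc_py_alt (foodstuffs : List String) : Bool :=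
  let cookieAt := cookieAtB foodstuffs
  if cookieAt.any (fun i => PySem.Set.contains cookieAt (i + 1)) then
    false
  else
    !(PySem.Set.contains cookieAt ((foodstuffs.length : Int) - 1))

-- ===== PRECONDITION & SPEC =====
def Spec_calc_py (foodstuffs : List String) (out : Bool) : Prop := out = calc_py_alt foodstuffs
instance (foodstuffs : List String) (out : Bool) : Decidable (Spec_calc_py foodstuffs out) := by unfold Spec_calc_py; infer_instance

-- ===== CLAIM (what is proved, stated in full; the proofs are below) =====
def Claim_equal_calc_py : Prop := ∀ (foodstuffs : List String), Dom_calc_py foodstuffs → Spec_calc_py foodstuffs (calc_py foodstuffs)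

-- ===== LEMMAS AND PROOFS =====

-- "some position k has a cookie at k and at k+1"
def AdjP (fs : List String) : Prop :=
  ∃ k : Nat, fs[k]? = some "cookie" ∧ fs[k + 1]? = some "cookie"

-- "the run ends on a cookie": for the empty suffix that is the incoming state jw.
def LastC (fs : List String) (jw : Bool) : Prop :=
  match fs with
  | [] => jw = true
  | _ => fs.getLast? = some "cookie"

lemma mem_cookieAtB (fs : List String) (i : Int) :
    i ∈ cookieAtB fs ↔ ∃ k : Nat, i = (k : Int) ∧ fs[k]? = some "cookie" := by
  unfold cookieAtB
  rw [PySem.Set.mem_ofList, List.mem_filterMap]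
  constructor
  · rintro ⟨p, hp, hg⟩
    rw [PySem.List.mem_enumerate_iff] at hp
    obtain ⟨k, hk, rfl⟩ := hp
    by_cases hc : fs[k] = "cookie"
    · refine ⟨k, ?_, by simp [hc, List.getElem?_eq_getElem hk]⟩
      simp [hc] at hg; omega
    · simp [hc] at hg
  · rintro ⟨k, rfl, hk⟩
    rw [List.getElem?_eq_some_iff] at hk
    obtain ⟨hlt, hc⟩ := hk
    exact ⟨((k : Int), fs[k]), by
      rw [PySem.List.mem_enumerate_iff]; exact ⟨k, hlt, by simp⟩, by simp [hc]⟩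

lemma adjP_cons (f : String) (rest : List String) :
    AdjP (f :: rest) ↔ (f = "cookie" ∧ rest.head? = some "cookie") ∨ AdjP rest := by
  constructor
  · rintro ⟨k, h1, h2⟩
    cases k with
    | zero =>
      left
      simp at h1
      cases rest with
      | nil => simp at h2
      | cons b t => simp at h2 ⊢; exact ⟨h1, h2⟩
    | succ k => right; exact ⟨k, by simpa using h1, by simpa using h2⟩
  · rintro (⟨hf, hh⟩ | ⟨k, h1, h2⟩)
    · cases rest with
      | nil => simp at hh
      | cons b t => exact ⟨0, by simp [hf], by simp at hh; simp [hh]⟩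
    · exact ⟨k + 1, by simpa using h1, by simpa using h2⟩

-- A's loop characterised: true iff no cookie right after the incoming cookie state,
-- no adjacent pair of cookies, and the sequence does not end on a cookie.
lemma calcLoopA_iff (fs : List String) : ∀ jw : Bool,
    calcLoopA jw fs = true ↔
      (¬ (jw = true ∧ fs.head? = some "cookie") ∧ ¬ AdjP fs ∧ ¬ LastC fs jw) := by
  induction fs with
  | nil =>
    intro jw
    cases jw <;> simp [calcLoopA, AdjP, LastC]
  | cons f rest ih =>
    intro jw
    by_cases hf : f = "cookie"
    · subst hf
      cases jw with
      | true => simp [calcLoopA]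
      | false =>
        rw [show calcLoopA false ("cookie" :: rest) = calcLoopA true rest by
          simp [calcLoopA]]
        rw [ih true, adjP_cons]
        have hlast : LastC ("cookie" :: rest) false ↔ LastC rest true := by
          cases rest with
          | nil => simp [LastC]
          | cons b t => simp [LastC, List.getLast?_cons_cons]
        simp only [hlast]
        constructor
        · rintro ⟨h1, h2, h3⟩
          exact ⟨by simp, by tauto, h3⟩
        · rintro ⟨h1, h2, h3⟩
          exact ⟨by tauto, by tauto, h3⟩
    · rw [show calcLoopA jw (f :: rest) = calcLoopA false rest by
        simp [calcLoopA, hf]]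
      rw [ih false, adjP_cons]
      have hhead : ¬ (jw = true ∧ (f :: rest).head? = some "cookie") := by
        simp [hf]
      have hlast : LastC (f :: rest) jw ↔ LastC rest false := by
        cases rest with
        | nil => simp [LastC, hf]
        | cons b t => simp [LastC, List.getLast?_cons_cons]
      simp only [hlast]
      constructor
      · rintro ⟨h1, h2, h3⟩
        exact ⟨hhead, by tauto, h3⟩
      · rintro ⟨h1, h2, h3⟩
        exact ⟨by simp, by tauto, h3⟩

lemma anyAdj_iff (fs : List String) :
    ((cookieAtB fs).any (fun i => PySem.Set.contains (cookieAtB fs) (i + 1)) = true)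
      ↔ AdjP fs := by
  rw [List.any_eq_true]
  constructor
  · rintro ⟨i, hi, hc⟩
    rw [PySem.Set.contains_iff] at hc
    rw [mem_cookieAtB] at hi hc
    obtain ⟨k, rfl, hk⟩ := hi
    obtain ⟨k', hk', hck'⟩ := hc
    have : k' = k + 1 := by omega
    subst this
    exact ⟨k, hk, hck'⟩
  · rintro ⟨k, h1, h2⟩
    refine ⟨(k : Int), (mem_cookieAtB fs _).2 ⟨k, rfl, h1⟩, ?_⟩
    rw [PySem.Set.contains_iff, mem_cookieAtB]
    exact ⟨k + 1, by push_cast; ring, h2⟩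

lemma lastMem_iff (fs : List String) :
    (((fs.length : Int) - 1) ∈ cookieAtB fs) ↔ LastC fs false := by
  rw [mem_cookieAtB]
  cases fs with
  | nil =>
    simp [LastC]
  | cons f rest =>
    rw [show LastC (f :: rest) false ↔ (f :: rest).getLast? = some "cookie" from Iff.rfl]
    rw [List.getLast?_eq_getElem?]
    constructor
    · rintro ⟨k, hk, hc⟩
      have : k = (f :: rest).length - 1 := by
        simp at hk ⊢; omega
      subst this; exact hc
    · intro h
      exact ⟨(f :: rest).length - 1, by simp, h⟩

-- ===== VERDICT (by name: the statement is the Claim_ definition above) =====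
theorem calc_py_spec : Claim_equal_calc_py := by
  intro fs _
  unfold Spec_calc_py calc_py calc_py_alt
  rw [Bool.eq_iff_iff, calcLoopA_iff fs false]
  by_cases hadj : AdjP fs
  · have := (anyAdj_iff fs).2 hadj
    simp only [this, if_true]
    simp [hadj]
  · have hany : ((cookieAtB fs).any (fun i => PySem.Set.contains (cookieAtB fs) (i + 1))) = false := by
      rw [← Bool.not_eq_true, anyAdj_iff]; exact hadj
    simp only [hany, Bool.false_eq_true, if_false]
    rw [Bool.not_eq_true', ← Bool.not_eq_true, PySem.Set.contains_iff, lastMem_iff]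
    constructor
    · rintro ⟨_, _, h3⟩; exact h3
    · intro h; exact ⟨by simp, hadj, h⟩
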